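-- pv_equiv track=rewrite | github.com/ElchaabiMohamed/InferCode_SVM | NC-5690-python-files/program_3327.py | doubleChiffre
-- ===== SOURCE A (Python) =====
-- def doubleChiffre(nombre):
--   trouve=False
--   prec=None
--   while nombre!=0 and not trouve:
--     if prec==nombre%10:
--       trouve=True
--     prec=nombre%10
--     nombre=nombre//10
--   return trouve
-- ===== SOURCE B (Python) =====
-- def doubleChiffre(nombre):
--     digits = []
--     while nombre != 0:
--         digits.append(nombre % 10)
--         nombre = nombre // 10
--     return any(digits[i] == digits[i + 1] for i in range(len(digits) - 1))
-- ===== Notes on version B (the rewrite author's own statement) =====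
-- stated objective: alternative
-- what changed: A interleaves the digit-extraction loop with an early-exit comparison against the previous digit; B first builds the full digit list, then does a separate pairwise adjacent-equality pass over it.
-- outside the precondition, e.g. on doubleChiffre(-12): A returns True, B does not finish within the time limit; on doubleChiffre(-1): A returns True, B does not finish within the time limit
import Mathlib
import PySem

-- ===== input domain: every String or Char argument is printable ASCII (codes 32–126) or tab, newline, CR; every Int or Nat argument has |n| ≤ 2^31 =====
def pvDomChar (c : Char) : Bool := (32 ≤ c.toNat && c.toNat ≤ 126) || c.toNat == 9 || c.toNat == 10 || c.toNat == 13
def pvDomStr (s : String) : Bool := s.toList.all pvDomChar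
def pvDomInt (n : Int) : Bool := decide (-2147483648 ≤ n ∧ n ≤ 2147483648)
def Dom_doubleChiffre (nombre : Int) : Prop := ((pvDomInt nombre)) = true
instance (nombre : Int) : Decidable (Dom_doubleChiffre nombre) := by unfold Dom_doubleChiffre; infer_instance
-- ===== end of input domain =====

-- B rebuilds A's answer as a two-pass computation: extract all digits first, then scan for an adjacent equal pair (alternative decomposition, same cost).

-- ===== PORT A =====
-- the while loop of A: state (nombre, prec, trouve); Python's // and % by 10 are PySem.Int.floordiv/mod.
-- On negatives the loop reaches a fixed point whose repeated digit makes trouve True, so it terminates on every Int.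
def pvLoopA (n : Int) (prec : Option Int) (trouve : Bool) : Bool :=
  if h : n ≠ 0 ∧ trouve = false then
    pvLoopA (PySem.Int.floordiv n 10) (some (PySem.Int.mod n 10))
      (if prec = some (PySem.Int.mod n 10) then true else trouve)
  else trouve
termination_by n.natAbs * 3 + (if trouve = true then 0 else if prec = some (9 : Int) then 1 else 2)
decreasing_by
  obtain ⟨hn, ht⟩ := h
  subst ht
  rw [PySem.Int.floordiv_eq_ediv_of_pos (by norm_num), PySem.Int.mod_eq_emod_of_pos (by norm_num)]
  by_cases hone : n = -1
  · subst hone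
    by_cases hp : prec = some ((-1 : Int) % 10)
    · simp [hp]
    · simp only [hp]
      split_ifs <;> simp_all
  · have h1 : (n / 10).natAbs < n.natAbs := by omega
    split_ifs <;> omega

def doubleChiffre (nombre : Int) : Bool := pvLoopA nombre none false

-- ===== PORT B =====
-- first pass: the digit list (least-significant first, mirroring Source B's append order);
-- Source B's loop runs on the nonnegative domain (Pre_), where Python % 10 and // 10 are Nat.mod / Nat.div exactly.
def pvDigitsB (n : Nat) : List Nat :=
  if h : n ≠ 0 then n % 10 :: pvDigitsB (n / 10) else []
termination_by n
decreasing_by exact Nat.div_lt_self (Nat.pos_of_ne_zero h) (by norm_num)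

-- second pass: any(digits[i] == digits[i+1] for i in range(len(digits)-1))
def doubleChiffre_alt (nombre : Int) : Bool :=
  let digits := pvDigitsB nombre.toNat
  (List.range (digits.length - 1)).any (fun i => digits.getD i 0 == digits.getD (i + 1) 0)

-- ===== PRECONDITION & SPEC =====
-- Pre_ excludes negative inputs, a corner outside the function's purpose (digits of a number): there A's floor-division
-- loop hits a fixed point and accidentally reports True off its repeated-digit tail, while the natural two-pass B
-- (and Source B itself) never terminates, so B returns no value to compare.
def Pre_doubleChiffre (nombre : Int) : Prop := 0 ≤ nombre
instance (nombre : Int) : Decidable (Pre_doubleChiffre nombre) := by unfold Pre_doubleChiffre; infer_instance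
def pvWitness_doubleChiffre : Int := 1223

def Spec_doubleChiffre (nombre : Int) (out : Bool) : Prop := out = doubleChiffre_alt nombre
instance (nombre : Int) (out : Bool) : Decidable (Spec_doubleChiffre nombre out) := by unfold Spec_doubleChiffre; infer_instance

-- ===== CLAIM (what is proved, stated in full; the proofs are below) =====
def Claim_equal_doubleChiffre : Prop := ∀ (nombre : Int), Dom_doubleChiffre nombre → Pre_doubleChiffre nombre → Spec_doubleChiffre nombre (doubleChiffre nombre)

-- ===== LEMMAS AND PROOFS =====
-- adjacent-pair predicate used as the common reference point
def pvPairAdj : List Nat → Bool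
  | x :: y :: r => (x == y) || pvPairAdj (y :: r)
  | _ => false

-- A's loop, once trouve is true, returns true
theorem pvLoopA_true (n : Int) (p : Option Int) : pvLoopA n p true = true := by
  unfold pvLoopA; simp

-- On a nonnegative argument, A's loop computes "prec equals the first digit, or some adjacent pair among the digits"
theorem pvLoopA_eq (k : Nat) (p : Option Int) :
    pvLoopA (k : Int) p false =
      (match pvDigitsB k with
       | [] => false
       | d :: _ => (decide (p = some ((d : Nat) : Int))) || pvPairAdj (pvDigitsB k)) := by
  induction k using Nat.strong_induction_on generalizing p with
  | _ k ih =>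
    by_cases h : k = 0
    · subst h
      unfold pvLoopA pvDigitsB; simp
    · have hd : pvDigitsB k = k % 10 :: pvDigitsB (k / 10) := by
        conv_lhs => rw [pvDigitsB]
        rw [dif_pos h]
      have hlt : k / 10 < k := Nat.div_lt_self (Nat.pos_of_ne_zero h) (by norm_num)
      have hki : ((k : Int) ≠ 0) := by exact_mod_cast h
      have hmod : PySem.Int.mod (k : Int) 10 = ((k % 10 : Nat) : Int) := by
        exact_mod_cast PySem.Int.mod_natCast k 10
      have hdiv : PySem.Int.floordiv (k : Int) 10 = ((k / 10 : Nat) : Int) := by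
        exact_mod_cast PySem.Int.floordiv_natCast k 10
      unfold pvLoopA
      rw [dif_pos (show (k : Int) ≠ 0 ∧ (false : Bool) = false from ⟨hki, rfl⟩)]
      rw [hmod, hdiv]
      by_cases hp : p = some ((k % 10 : Nat) : Int)
      · have ht : (if p = some ((k % 10 : Nat) : Int) then true else false) = true := by rw [if_pos hp]
        rw [ht, pvLoopA_true, hd]
        simp [hp]
      · have hf : (if p = some ((k % 10 : Nat) : Int) then true else false) = false := by rw [if_neg hp]
        have hp' : ¬ p = some ((k : Int) % 10) := fun hc => hp (by exact_mod_cast hc)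
        rw [hf, ih (k / 10) hlt (some ((k % 10 : Nat) : Int)), hd]
        cases hq : pvDigitsB (k / 10) with
        | nil => simp [pvPairAdj, hp']
        | cons d r =>
          by_cases hnd : k % 10 = d
          · simp [pvPairAdj, hnd, -Int.natCast_mod]
          · have hnd' : ¬ ((k : Int) % 10 = (d : Int)) := fun hc => hnd (by exact_mod_cast hc)
            simp [pvPairAdj, hp', hnd, hnd']

theorem pvLoopA_none (k : Nat) : pvLoopA (k : Int) none false = pvPairAdj (pvDigitsB k) := by
  rw [pvLoopA_eq]
  cases h : pvDigitsB k with
  | nil => simp [pvPairAdj]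
  | cons d r => simp

-- B's range-indexed scan equals the recursive adjacent-pair predicate
theorem pvRange_eq_pairAdj (l : List Nat) :
    (List.range (l.length - 1)).any (fun i => l.getD i 0 == l.getD (i + 1) 0) = pvPairAdj l := by
  induction l with
  | nil => simp [pvPairAdj]
  | cons x t ih =>
    cases t with
    | nil => simp [pvPairAdj]
    | cons y r =>
      have hlen : (x :: y :: r).length - 1 = (y :: r).length - 1 + 1 := by simp
      rw [hlen, List.range_succ_eq_map]
      simp only [List.any_cons, List.any_map]
      rw [pvPairAdj]
      have h0 : ((x :: y :: r).getD 0 0 == (x :: y :: r).getD 1 0) = (x == y) := by simp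
      have hfun : ∀ i, ((fun i => (x :: y :: r).getD i 0 == (x :: y :: r).getD (i + 1) 0) ∘ Nat.succ) i
          = ((y :: r).getD i 0 == (y :: r).getD (i + 1) 0) := by
        intro i; simp
      rw [h0, ← ih, List.any_congr rfl hfun]

-- ===== VERDICT (by name: the statement is the Claim_ definition above) =====
theorem doubleChiffre_spec : Claim_equal_doubleChiffre := by
  intro nombre _ hpre
  unfold Spec_doubleChiffre doubleChiffre doubleChiffre_alt
  have hn : nombre = ((nombre.toNat : Nat) : Int) := (Int.toNat_of_nonneg hpre).symm
  rw [hn, pvLoopA_none, pvRange_eq_pairAdj, Int.toNat_natCast]
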